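-- pv_equiv track=rewrite | github.com/DanaSwitch/leetcode | HWod/stack/happy_match.py | solution
-- ===== SOURCE A (Python) =====
-- def solution(s):
--     # 1. 异常输入检查：如果不全是字母，返回 0
--     if not s.isalpha():
--         return 0
--
--     stack = []
--
--     for char in s:
--         # 2. 如果栈不为空且栈顶元素等于当前字符，进行消除
--         if stack and stack[-1] == char:
--             stack.pop()
--         else:
--             # 3. 否则，将字符入栈
--             stack.append(char)
--
--     # 4. 返回栈中剩余元素的长度
--     return len(stack)
-- ===== SOURCE B (Python) =====
-- def solution(s):
--     # 1. same guard: non-alphabetic (or empty) input returns 0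
--     if not s.isalpha():
--         return 0
--     t = s
--     while True:
--         # one left-to-right pass deleting each adjacent equal pair
--         out = []
--         i = 0
--         n = len(t)
--         while i < n:
--             if i + 1 < n and t[i] == t[i + 1]:
--                 i += 2
--             else:
--                 out.append(t[i])
--                 i += 1
--         new = ''.join(out)
--         if new == t:
--             return len(t)
--         t = new
-- ===== Notes on version B (the rewrite author's own statement) =====
-- stated objective: alternative
-- what changed: Replaces the stack-based single pass with a reduce-to-fixpoint loop that repeatedly rebuilds the string with adjacent equal pairs deleted until a pass removes nothing, returning the length of the irreducible string.
import Mathlib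
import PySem

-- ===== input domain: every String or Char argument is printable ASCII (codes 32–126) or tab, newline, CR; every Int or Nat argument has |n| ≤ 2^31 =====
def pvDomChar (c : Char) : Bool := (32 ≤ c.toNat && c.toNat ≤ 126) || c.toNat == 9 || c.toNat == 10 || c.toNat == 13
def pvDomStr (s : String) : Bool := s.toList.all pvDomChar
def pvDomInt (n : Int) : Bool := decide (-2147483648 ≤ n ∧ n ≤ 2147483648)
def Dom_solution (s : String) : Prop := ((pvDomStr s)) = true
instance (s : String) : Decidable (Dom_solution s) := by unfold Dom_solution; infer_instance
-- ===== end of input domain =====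

-- B replaces A's one-pass stack with a reduce-to-fixpoint loop (repeated passes deleting
-- adjacent equal pairs until nothing changes): an alternative decomposition, not faster.

-- ===== PORT A =====
-- Python stack held top-first (head = Python stack[-1]); the length is unchanged by this representation.
def solStep (st : List Char) (c : Char) : List Char :=
  match st with
  | h :: t => if h == c then t else c :: h :: t
  | [] => [c]

def solution (s : String) : Int :=
  if PySem.Str.strIsalpha s = false then 0
  else ((s.toList.foldl solStep []).length : Int)

-- ===== PORT B =====
-- the inner index scan of Source B: one left-to-right pass, each adjacent equal pair deleted
def onePass : List Char → List Char
  | c1 :: c2 :: rest => if c1 == c2 then onePass rest else c1 :: onePass (c2 :: rest)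
  | l => l

theorem onePass_length_le (l : List Char) : (onePass l).length ≤ l.length := by
  induction l using onePass.induct with
  | case1 c1 c2 rest heq ih =>
      simp only [onePass, if_pos heq, List.length_cons]
      omega
  | case2 c1 c2 rest hne ih =>
      simp only [onePass, if_neg hne, List.length_cons]
      simp only [List.length_cons] at ih
      omega
  | case3 l h =>
      cases l with
      | nil => simp [onePass]
      | cons c t =>
          cases t with
          | nil => simp [onePass]
          | cons d r => exact absurd rfl (h c d r)

theorem onePass_length_lt {l : List Char} (h : onePass l ≠ l) : (onePass l).length < l.length := by
  induction l using onePass.induct with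
  | case1 c1 c2 rest heq ih =>
      simp only [onePass, if_pos heq, List.length_cons]
      have := onePass_length_le rest
      omega
  | case2 c1 c2 rest hne ih =>
      simp only [onePass, if_neg hne] at h ⊢
      have h' : onePass (c2 :: rest) ≠ c2 :: rest := fun he => h (by rw [he])
      have := ih h'
      simp only [List.length_cons] at this ⊢
      omega
  | case3 l hl =>
      exfalso
      cases l with
      | nil => exact h rfl
      | cons c t =>
          cases t with
          | nil => exact h rfl
          | cons d r => exact hl c d r rfl

-- Source B's while-True loop: iterate onePass until a pass changes nothing, return that string
def reduceFix (t : List Char) : List Char :=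
  if h : onePass t = t then t else reduceFix (onePass t)
termination_by t.length
decreasing_by exact onePass_length_lt h

def solution_alt (s : String) : Int :=
  if PySem.Str.strIsalpha s = false then 0
  else ((reduceFix s.toList).length : Int)

-- ===== PRECONDITION & SPEC =====
def Spec_solution (s : String) (out : Int) : Prop := out = solution_alt s
instance (s : String) (out : Int) : Decidable (Spec_solution s out) := by unfold Spec_solution; infer_instance

-- ===== CLAIM (what is proved, stated in full; the proofs are below) =====
def Claim_equal_solution : Prop := ∀ (s : String), Dom_solution s → Spec_solution s (solution s)

-- ===== LEMMAS AND PROOFS =====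

-- A's stack never holds two equal adjacent characters
theorem solStep_chain {st : List Char} (h : st.IsChain (· ≠ ·)) (c : Char) :
    (solStep st c).IsChain (· ≠ ·) := by
  match st with
  | [] => exact List.IsChain.singleton c
  | h1 :: t =>
      simp only [solStep]
      by_cases hb : h1 = c
      · simp only [hb, beq_self_eq_true, if_pos]
        exact h.tail
      · simp only [beq_iff_eq, if_neg hb]
        exact List.isChain_cons_cons.mpr ⟨fun he => hb he.symm, h⟩

-- pushing then cancelling (or cancelling then pushing) the same character restores the stack
theorem solStep_twice {st : List Char} (h : st.IsChain (· ≠ ·)) (c : Char) :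
    solStep (solStep st c) c = st := by
  match st with
  | [] => simp [solStep]
  | h1 :: t =>
      by_cases hb : h1 = c
      · subst hb
        simp only [solStep, beq_self_eq_true, if_pos]
        match t with
        | [] => rfl
        | h2 :: t2 =>
            have hne : h1 ≠ h2 := (List.isChain_cons_cons.mp h).1
            have : (h2 == h1) = false := beq_eq_false_iff_ne.mpr (fun he => hne he.symm)
            simp [this]
      · have : (h1 == c) = false := beq_eq_false_iff_ne.mpr hb
        simp [solStep, this]

-- one reduction pass does not change the stack run (for a chain-distinct stack)
theorem run_onePass {st : List Char} (hst : st.IsChain (· ≠ ·)) (l : List Char) :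
    (onePass l).foldl solStep st = l.foldl solStep st := by
  induction l using onePass.induct generalizing st with
  | case1 c1 c2 rest heq ih =>
      have hc : c2 = c1 := (beq_iff_eq.mp heq).symm
      subst hc
      simp only [onePass, if_pos heq, List.foldl_cons]
      rw [ih hst, solStep_twice hst]
  | case2 c1 c2 rest hne ih =>
      simp only [onePass, if_neg hne, List.foldl_cons]
      exact ih (solStep_chain hst c1)
  | case3 l h =>
      cases l with
      | nil => rfl
      | cons c t =>
          cases t with
          | nil => rfl
          | cons d r => exact absurd rfl (h c d r)

-- the whole fixpoint loop does not change the stack run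
theorem run_reduceFix (l : List Char) :
    (reduceFix l).foldl solStep [] = l.foldl solStep [] := by
  induction l using reduceFix.induct with
  | case1 t h => rw [reduceFix, dif_pos h]
  | case2 t h ih =>
      rw [reduceFix, dif_neg h, ih, run_onePass List.isChain_nil]

-- a fixpoint of onePass has no adjacent equal characters
theorem fix_chain {l : List Char} (h : onePass l = l) : l.IsChain (· ≠ ·) := by
  induction l using onePass.induct with
  | case1 c1 c2 rest heq ih =>
      exfalso
      rw [onePass, if_pos heq] at h
      have h1 := onePass_length_le rest
      have h2 : (onePass rest).length = (c1 :: c2 :: rest).length := by rw [h]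
      simp only [List.length_cons] at h2
      omega
  | case2 c1 c2 rest hne ih =>
      rw [onePass, if_neg hne] at h
      have h' : onePass (c2 :: rest) = c2 :: rest := by injection h
      exact List.isChain_cons_cons.mpr ⟨fun he => hne (beq_iff_eq.mpr he), ih h'⟩
  | case3 l hl =>
      cases l with
      | nil => exact List.isChain_nil
      | cons c t =>
          cases t with
          | nil => exact List.IsChain.singleton c
          | cons d r => exact absurd rfl (hl c d r)

-- reduceFix really reaches a fixpoint
theorem onePass_reduceFix (l : List Char) : onePass (reduceFix l) = reduceFix l := by
  induction l using reduceFix.induct with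
  | case1 t h => rw [reduceFix, dif_pos h]; exact h
  | case2 t h ih => rw [reduceFix, dif_neg h]; exact ih

-- running the stack over a chain-distinct string pushes everything
theorem run_of_chain (l : List Char) (st : List Char)
    (hl : l.IsChain (· ≠ ·)) (hhd : ∀ c, l.head? = some c → st.head? ≠ some c) :
    l.foldl solStep st = l.reverse ++ st := by
  induction l generalizing st with
  | nil => simp
  | cons c rest ih =>
      have hstep : solStep st c = c :: st := by
        match st with
        | [] => rfl
        | h1 :: t =>
            have hne : h1 ≠ c := fun he => hhd c rfl (by simp [he])
            have : (h1 == c) = false := beq_eq_false_iff_ne.mpr hne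
            simp [solStep, this]
      have htl : rest.IsChain (· ≠ ·) := hl.tail
      have hh : ∀ d, rest.head? = some d → (c :: st).head? = some d → False := by
        intro d hd hc
        cases rest with
        | nil => simp at hd
        | cons e r =>
            have : c ≠ e := (List.isChain_cons_cons.mp hl).1
            simp at hd hc
            exact this (hc.trans hd.symm)
      rw [List.foldl_cons, hstep, ih (c :: st) htl (fun d hd hc => hh d hd hc)]
      simp

-- ===== VERDICT (by name: the statement is the Claim_ definition above) =====
theorem solution_spec : Claim_equal_solution := by
  intro s _
  unfold Spec_solution solution solution_alt
  by_cases hg : PySem.Str.strIsalpha s = false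
  · rw [if_pos hg, if_pos hg]
  · rw [if_neg hg, if_neg hg]
    congr 1
    rw [← run_reduceFix s.toList]
    have hfix := onePass_reduceFix s.toList
    have hchain := fix_chain hfix
    rw [run_of_chain _ [] hchain (by intro c _ hc; simp at hc)]
    simp
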